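-- pv_equiv track=rewrite | github.com/westenfelder/InterCode-ALFA | src/icalfa/main.py | index_to_img
-- ===== SOURCE A (Python) =====
-- def index_to_img(index):
--     index = int(index)
--     # splits = [60, 53, 60, 27, 24] # intercode indices
--     splits = [46, 49, 57, 23, 18] # intercode-ALFA indices
--     cumsum = 0
--
--     for img_num, count in enumerate(splits, start=0):
--         if index < cumsum + count:
--             idx = index - cumsum
--             return idx, img_num
--         cumsum += count
--
--     raise ValueError("Index out of allowable range")
-- ===== SOURCE B (Python) =====
-- def index_to_img(index):
--     index = int(index)
--     prefix = [46, 95, 152, 175, 193]  # cumulative ends of the splits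
--     # binary search: first position whose prefix end exceeds index (bisect_right)
--     lo, hi = 0, len(prefix)
--     while lo < hi:
--         mid = (lo + hi) // 2
--         if prefix[mid] <= index:
--             lo = mid + 1
--         else:
--             hi = mid
--     if lo >= len(prefix):
--         raise ValueError("Index out of allowable range")
--     start = prefix[lo - 1] if lo else 0
--     return index - start, lo
-- ===== Notes on version B (the rewrite author's own statement) =====
-- stated objective: alternative
-- what changed: Replaces the running-sum linear scan over the splits with a precomputed prefix-end table and a binary search (bisect_right) for the image number.
import Mathlib
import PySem

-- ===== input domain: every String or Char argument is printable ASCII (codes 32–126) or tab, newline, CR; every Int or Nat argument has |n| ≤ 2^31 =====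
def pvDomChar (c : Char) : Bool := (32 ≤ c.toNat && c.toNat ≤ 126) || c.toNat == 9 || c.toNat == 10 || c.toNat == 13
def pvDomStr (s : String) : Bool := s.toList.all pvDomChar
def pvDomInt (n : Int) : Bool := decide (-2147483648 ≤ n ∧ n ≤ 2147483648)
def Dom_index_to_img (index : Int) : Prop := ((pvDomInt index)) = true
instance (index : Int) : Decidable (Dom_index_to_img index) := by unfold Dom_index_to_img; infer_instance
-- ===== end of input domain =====

-- B replaces A's running-sum linear scan with a pfx-end table and a binary search (alternative structure, same cost at k=5).


-- ===== PORT A =====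
-- the enumerate(splits) loop with a running cumsum; the [] case is Python's
-- 'raise ValueError' and is excluded by Pre_ (dummy value (0, 0) there)
def idxLoopA (pairs : List (Int × Int)) (index cumsum : Int) : Int × Int :=
  match pairs with
  | [] => (0, 0)
  | (imgNum, count) :: rest =>
      if index < cumsum + count then (index - cumsum, imgNum)
      else idxLoopA rest index (cumsum + count)

def index_to_img (index : Int) : Int × Int :=
  idxLoopA [(0, 46), (1, 49), (2, 57), (3, 23), (4, 18)] index 0

-- ===== PORT B =====
-- the while lo < hi binary-search loop of Source B
def bsLoopB (pfx : List Int) (index : Int) (lo hi : Nat) : Nat :=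
  if h : lo < hi then
    let mid := (lo + hi) / 2
    if pfx.getD mid 0 ≤ index then bsLoopB pfx index (mid + 1) hi
    else bsLoopB pfx index lo mid
  else lo
termination_by hi - lo
decreasing_by all_goals omega

def index_to_img_alt (index : Int) : Int × Int :=
  let pfx : List Int := [46, 95, 152, 175, 193]
  let lo := bsLoopB pfx index 0 pfx.length
  if lo ≥ pfx.length then (0, 0)  -- Python raises ValueError here; excluded by Pre_
  else
    let start := if lo = 0 then 0 else pfx.getD (lo - 1) 0
    (index - start, (lo : Int))

-- ===== PRECONDITION & SPEC =====
-- Pre_ excludes exactly the inputs (index ≥ 193, the total of the splits) on which both Pythons raise ValueError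
def Pre_index_to_img (index : Int) : Prop := index < 193
instance (index : Int) : Decidable (Pre_index_to_img index) := by unfold Pre_index_to_img; infer_instance
def pvWitness_index_to_img : Int := (100)
def Spec_index_to_img (index : Int) (out : Int × Int) : Prop := out = index_to_img_alt index
instance (index : Int) (out : Int × Int) : Decidable (Spec_index_to_img index out) := by unfold Spec_index_to_img; infer_instance

-- ===== CLAIM (what is proved, stated in full; the proofs are below) =====
def Claim_equal_index_to_img : Prop := ∀ (index : Int), Dom_index_to_img index → Pre_index_to_img index → Spec_index_to_img index (index_to_img index)

-- ===== LEMMAS AND PROOFS =====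
lemma a_closed (index : Int) :
    index_to_img index =
      (if index < 46 then (index, 0)
       else if index < 95 then (index - 46, 1)
       else if index < 152 then (index - 95, 2)
       else if index < 175 then (index - 152, 3)
       else if index < 193 then (index - 175, 4)
       else (0, 0)) := by
  simp only [index_to_img, idxLoopA]
  split_ifs <;> simp_all

lemma bs_val (index : Int) :
    bsLoopB [46, 95, 152, 175, 193] index 0 5 =
      (if index < 46 then 0 else if index < 95 then 1 else if index < 152 then 2
       else if index < 175 then 3 else if index < 193 then 4 else 5) := by
  rw [bsLoopB]; norm_num
  split_ifs <;> (try omega) <;> rw [bsLoopB] <;> norm_num <;> (try split_ifs) <;>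
    (try omega) <;> rw [bsLoopB] <;> norm_num <;> (try split_ifs) <;>
    (try omega) <;> rw [bsLoopB] <;> norm_num

lemma b_closed (index : Int) :
    index_to_img_alt index =
      (if index < 46 then (index, 0)
       else if index < 95 then (index - 46, 1)
       else if index < 152 then (index - 95, 2)
       else if index < 175 then (index - 152, 3)
       else if index < 193 then (index - 175, 4)
       else (0, 0)) := by
  show (if bsLoopB [46, 95, 152, 175, 193] index 0 5 ≥ 5 then ((0 : Int), (0 : Int))
        else (index - (if bsLoopB [46, 95, 152, 175, 193] index 0 5 = 0 then 0
                       else ([46, 95, 152, 175, 193] : List Int).getD (bsLoopB [46, 95, 152, 175, 193] index 0 5 - 1) 0),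
              (bsLoopB [46, 95, 152, 175, 193] index 0 5 : Int))) = _
  rw [bs_val]
  split_ifs <;> simp_all [List.getD]

-- ===== VERDICT (by name: the statement is the Claim_ definition above) =====
theorem index_to_img_spec : Claim_equal_index_to_img := by
  intro index _ _
  unfold Spec_index_to_img
  rw [a_closed, b_closed]
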